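-- pv_equiv track=rewrite | github.com/SEOYOUNG-cloud/BaekJoon | CodeTree/Beautiful_num.py | beautiful
-- ===== SOURCE A (Python) =====
-- def beautiful(num):
--     stack = []
--     count = 0
--     for i in num:
--         if not stack: # 리스트가 비었으면
--             stack.append(i)
--             count = 1
--         else:
--             if stack[-1] == i and i != 1: # 다음 들어오는거랑 같으면
--                 if count == stack[-1]:
--                     count = 1
--                 else:
--                     count += 1
--                 stack.append(i)
--             else:
--                 if count != stack[-1]:
--                     return False
--                 count = 1
--                 stack.append(i)
--
--     if count == stack[-1]:
--         return True
--     else: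
--         return False
-- ===== SOURCE B (Python) =====
-- def beautiful(num):
--     # Run-length encode, then check each run: value v must be positive and run length a multiple of v.
--     runs = []
--     for x in num:
--         if runs and runs[-1][0] == x:
--             runs[-1][1] += 1
--         else:
--             runs.append([x, 1])
--     return all(v > 0 and l % v == 0 for v, l in runs)
-- ===== Notes on version B (the rewrite author's own statement) =====
-- stated objective: simpler
-- what changed: A's single interleaved pass with a resetting counter and an ever-growing stack is replaced by run-length encoding the input into (value, length) runs and then checking each run with the closed condition v > 0 and length % v == 0.
-- outside the precondition, e.g. on beautiful([]): A raises IndexError, B returns True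
-- crash fix: On the empty list A raises IndexError (stack[-1] on the empty stack) while B returns True, the vacuous 'all runs valid'. — e.g. on beautiful([]): A raises IndexError, B returns true
import Mathlib
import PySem

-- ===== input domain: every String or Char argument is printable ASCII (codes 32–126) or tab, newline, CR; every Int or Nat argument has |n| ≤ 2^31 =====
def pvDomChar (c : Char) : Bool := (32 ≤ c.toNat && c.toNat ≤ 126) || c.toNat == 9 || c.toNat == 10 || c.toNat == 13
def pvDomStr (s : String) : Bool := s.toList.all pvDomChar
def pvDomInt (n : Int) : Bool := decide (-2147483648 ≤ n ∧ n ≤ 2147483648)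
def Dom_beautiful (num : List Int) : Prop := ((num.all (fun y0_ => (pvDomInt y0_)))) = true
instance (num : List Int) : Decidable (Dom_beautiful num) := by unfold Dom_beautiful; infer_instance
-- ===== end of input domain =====

-- B replaces A's interleaved counter-and-stack scan by run-length encoding followed by a
-- separate per-run divisibility check (simpler decomposition, same O(n) cost).

-- ===== PORT A =====
-- A's loop: `stack` only ever matters through its last element, which we carry as `prev`;
-- the early `return False` is the `false` leaf. Structure follows A's branches in order.
def beautifulLoop (prev : Int) (count : Int) : List Int → Bool
  | [] => count == prev
  | i :: rest =>
    if prev == i && !(i == 1) then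
      beautifulLoop i (if count == prev then 1 else count + 1) rest
    else
      if !(count == prev) then false
      else beautifulLoop i 1 rest

def beautiful (num : List Int) : Bool :=
  match num with
  | [] => false   -- Python A raises IndexError here (stack[-1] on empty stack); excluded by Pre_beautiful
  | i :: rest => beautifulLoop i 1 rest

-- ===== PORT B =====
-- builds the run table exactly as Source B does: compare with the LAST run, extend it or append a new one
def pushRun (runs : List (Int × Int)) (x : Int) : List (Int × Int) :=
  match runs.getLast? with
  | some (v, l) => if v == x then runs.dropLast ++ [(v, l + 1)] else runs ++ [(x, 1)]
  | none => [(x, 1)]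

-- the guard `0 < v` makes the `v = 0` value of the second conjunct irrelevant (Python short-circuits)
def beautiful_alt (num : List Int) : Bool :=
  (num.foldl pushRun []).all (fun p => decide (0 < p.1) && (PySem.Int.mod p.2 p.1 == 0))

-- ===== PRECONDITION & SPEC =====
-- Pre_ excludes only the empty list, on which Python A raises IndexError (stack[-1] of an empty stack).
def Pre_beautiful (num : List Int) : Prop := num ≠ []
instance (num : List Int) : Decidable (Pre_beautiful num) := by unfold Pre_beautiful; infer_instance
def pvWitness_beautiful : List Int := [2, 2]

-- On the empty list A raises IndexError while B returns True (the empty sequence has no invalid run).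
def Raises_beautiful (num : List Int) : Prop := num = []
instance (num : List Int) : Decidable (Raises_beautiful num) := by unfold Raises_beautiful; infer_instance
def pvRaiseWitness_beautiful : List Int := []
def pvRaiseWitnessOut_beautiful : Bool := true

def Spec_beautiful (num : List Int) (out : Bool) : Prop := out = beautiful_alt num
instance (num : List Int) (out : Bool) : Decidable (Spec_beautiful num out) := by unfold Spec_beautiful; infer_instance

-- ===== CLAIM (what is proved, stated in full; the proofs are below) =====
def Claim_equal_beautiful : Prop := ∀ (num : List Int), Dom_beautiful num → Pre_beautiful num → Spec_beautiful num (beautiful num)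
def Claim_raises_beautiful : Prop := (∀ (num : List Int), Dom_beautiful num → Raises_beautiful num → ¬ Pre_beautiful num) ∧ (Dom_beautiful (pvRaiseWitness_beautiful) ∧ Raises_beautiful (pvRaiseWitness_beautiful) ∧ beautiful_alt (pvRaiseWitness_beautiful) = pvRaiseWitnessOut_beautiful)

-- ===== LEMMAS AND PROOFS =====

-- proof-side recursive form of Source B's run-length table: current run (v,l), rest of the input
def runsAux (v : Int) (l : Int) : List Int → List (Int × Int)
  | [] => [(v, l)]
  | x :: rest => if x = v then runsAux v (l + 1) rest else (v, l) :: runsAux x 1 rest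

def runOK (p : Int × Int) : Bool := decide (0 < p.1) && (p.2 % p.1 == 0)

-- the port's per-run check equals runOK: for 0 < v Python's % is Int.emod; otherwise both are false
theorem runOK_eq (p : Int × Int) :
    (decide (0 < p.1) && (PySem.Int.mod p.2 p.1 == 0)) = runOK p := by
  by_cases h : 0 < p.1
  · simp [runOK, h, PySem.Int.mod_eq_emod_of_pos h]
  · simp [runOK, h]

-- A's counter value after l elements of a run of v's
def clk (v l : Int) : Int := if 1 ≤ v then (l - 1) % v + 1 else l

theorem foldl_pushRun_runsAux (xs : List Int) :
    ∀ (acc : List (Int × Int)) (v l : Int),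
    xs.foldl pushRun (acc ++ [(v, l)]) = acc ++ runsAux v l xs := by
  induction xs with
  | nil => intro acc v l; simp [runsAux]
  | cons x rest ih =>
    intro acc v l
    simp only [List.foldl_cons, runsAux]
    by_cases h : v = x
    · have hp : pushRun (acc ++ [(v, l)]) x = acc ++ [(v, l + 1)] := by
        simp [pushRun, h]
      rw [hp, if_pos h.symm, ih acc v (l + 1)]
    · have hp : pushRun (acc ++ [(v, l)]) x = (acc ++ [(v, l)]) ++ [(x, 1)] := by
        simp [pushRun, h]
      rw [hp, if_neg (fun h' => h h'.symm), ih (acc ++ [(v, l)]) x 1]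
      simp

theorem clk_eq_iff (v l : Int) (hl : 1 ≤ l) :
    (clk v l = v) ↔ (0 < v ∧ l % v = 0) := by
  unfold clk
  by_cases hv : 1 ≤ v
  · rw [if_pos hv]
    have hvpos : 0 < v := hv
    have h0 : 0 ≤ (l - 1) % v := Int.emod_nonneg _ (by omega)
    have h1 : (l - 1) % v < v := Int.emod_lt_of_pos _ hvpos
    have hdiv := Int.ediv_add_emod (l - 1) v
    constructor
    · intro h
      refine ⟨hvpos, ?_⟩
      -- l = v * q + v, so v ∣ l
      have : l = v * ((l - 1) / v) + v := by omega
      have : l % v = (v * ((l - 1) / v) + v) % v := by rw [← this]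
      simp [this]
    · rintro ⟨-, h⟩
      -- l ≡ 0 [mod v] and l = v*q + ((l-1)%v + 1) with 0 < (l-1)%v+1 ≤ v forces (l-1)%v+1 = v
      have hl' : l = v * ((l - 1) / v) + ((l - 1) % v + 1) := by omega
      have h2 : ((l - 1) % v + 1) % v = 0 := by
        have : l % v = ((l - 1) % v + 1) % v := by
          conv_lhs => rw [hl']
          simp
        omega
      by_contra hne
      have hlt : (l - 1) % v + 1 < v := by omega
      rw [Int.emod_eq_of_lt (by omega) hlt] at h2
      omega
  · rw [if_neg hv]
    constructor
    · intro h; omega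
    · rintro ⟨h, -⟩; omega

theorem clk_succ (v l : Int) (hl : 1 ≤ l) :
    clk v (l + 1) = if clk v l = v then 1 else clk v l + 1 := by
  unfold clk
  by_cases hv : 1 ≤ v
  · rw [if_pos hv, if_pos hv, show l + 1 - 1 = l by ring]
    have hvpos : 0 < v := hv
    have h0 : 0 ≤ (l - 1) % v := Int.emod_nonneg _ (by omega)
    have h1 : (l - 1) % v < v := Int.emod_lt_of_pos _ hvpos
    have hdiv := Int.ediv_add_emod (l - 1) v
    have hl' : l = v * ((l - 1) / v) + ((l - 1) % v + 1) := by omega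
    have hmod : l % v = ((l - 1) % v + 1) % v := by
      conv_lhs => rw [hl']
      simp
    by_cases h : (l - 1) % v + 1 = v
    · rw [if_pos (by omega)]
      have : l % v = 0 := by rw [hmod, h, Int.emod_self]
      omega
    · rw [if_neg (by omega)]
      have : l % v = (l - 1) % v + 1 := by
        rw [hmod, Int.emod_eq_of_lt (by omega) (by omega)]
      omega
  · rw [if_neg hv, if_neg hv, if_neg (show ¬ l = v by omega)]

theorem loop_eq_runs (rest : List Int) :
    ∀ (v l : Int), 1 ≤ l →
    beautifulLoop v (clk v l) rest = (runsAux v l rest).all runOK := by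
  induction rest with
  | nil =>
    intro v l hl
    simp only [beautifulLoop, runsAux, List.all_cons, List.all_nil, Bool.and_true, runOK]
    rcases (clk_eq_iff v l hl) with ⟨h1, h2⟩
    by_cases h : clk v l = v
    · rcases h1 h with ⟨ha, hb⟩
      simp [h, ha, hb]
    · have : ¬ (0 < v ∧ l % v = 0) := fun hc => h (h2 hc)
      rcases Decidable.not_and_iff_or_not.mp this with hc | hc
      · simp [h, hc]
      · by_cases hv : 0 < v
        · simp [h, hv, hc]
        · simp [h, hv]
  | cons x rest ih =>
    intro v l hl
    simp only [beautifulLoop, runsAux]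
    by_cases hx : x = v
    · subst hx
      by_cases h1 : (x : Int) = 1
      · -- v = 1: A takes the else-branch (i == 1), the counter is always 1 = clk 1 l
        subst h1
        have hclk : clk 1 l = 1 := by simp [clk]
        have hclk' : clk 1 (l + 1) = 1 := by simp [clk]
        have hres := ih 1 (l + 1) (by omega)
        rw [hclk'] at hres
        rw [hclk, if_pos rfl]
        simpa using hres
      · have hres := ih x (l + 1) (by omega)
        rw [clk_succ x l hl] at hres
        rw [if_pos rfl]
        rw [if_pos (show ((x == x) && !(x == 1)) = true by simp [h1])]
        by_cases h : clk x l = x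
        · rw [if_pos h] at hres
          simpa [h] using hres
        · rw [if_neg h] at hres
          have hb2 : (clk x l == x) = false := by simp [h]
          simpa [hb2] using hres
    · have hvx : ¬ v = x := fun h => hx h.symm
      rw [if_neg (show ¬ ((v == x) && !(x == 1)) = true by simp [hvx]), if_neg hx]
      simp only [List.all_cons]
      have hclk1 : clk x 1 = 1 := by unfold clk; by_cases hx1 : 1 ≤ x <;> simp [hx1]
      have hres := ih x 1 le_rfl
      rw [hclk1] at hres
      by_cases h : clk v l = v
      · rcases (clk_eq_iff v l hl).mp h with ⟨ha, hb'⟩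
        have hrun : runOK (v, l) = true := by simp [runOK, ha, hb']
        simp [h, hrun, hres]
      · have hrun : runOK (v, l) = false := by
          have hn : ¬ (0 < v ∧ l % v = 0) := fun hc => h ((clk_eq_iff v l hl).mpr hc)
          rcases Decidable.not_and_iff_or_not.mp hn with hc | hc
          · simp [runOK, hc]
          · by_cases hv : 0 < v
            · simp [runOK, hv, hc]
            · simp [runOK, hv]
        have hb2 : (clk v l == v) = false := by simp [h]
        simp [hb2, hrun]

-- ===== VERDICT (by name: the statement is the Claim_ definition above) =====
theorem beautiful_spec : Claim_equal_beautiful := by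
  intro num _ hpre
  unfold Spec_beautiful
  match num with
  | [] => exact absurd rfl hpre
  | i :: rest =>
    show beautifulLoop i 1 rest = beautiful_alt (i :: rest)
    unfold beautiful_alt
    rw [List.foldl_cons]
    have hpush : pushRun [] i = [] ++ [(i, (1 : Int))] := by simp [pushRun]
    rw [hpush, foldl_pushRun_runsAux rest [] i 1]
    have := loop_eq_runs rest i 1 le_rfl
    have hclk1 : clk i 1 = 1 := by unfold clk; by_cases h : 1 ≤ i <;> simp [h]
    rw [hclk1] at this
    rw [show (fun p : Int × Int => decide (0 < p.1) && (PySem.Int.mod p.2 p.1 == 0)) = runOK from funext runOK_eq]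
    exact this

@[simp] theorem beautiful_raises : Claim_raises_beautiful := by
  unfold Claim_raises_beautiful
  exact ⟨fun num _ h => by simpa [Pre_beautiful] using h, by decide⟩
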